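-- pv_equiv track=rewrite | github.com/snapshotmanager/boom-boot | boom/_boom.py | find_minimum_sha_prefix
-- ===== SOURCE A (Python) =====
-- def find_minimum_sha_prefix(shas, min_prefix):
--     """Find the minimum SHA prefix length guaranteeing uniqueness.
--
--     Find the minimum unique prefix for the set of SHA IDs in the set
--     ``shas``.
--
--     :param shas: A set of SHA IDs
--     :param min_prefix: Initial minimum prefix value
--     :returns: The minimum unique prefix length for the set
--     :rtype: int
--     """
--     shas = list(shas)
--     shas.sort()
--     for sha in shas:
--         if shas.index(sha) == len(shas) - 1:
--             continue
--
--         def _next_sha(shas, sha):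
--             return shas[shas.index(sha) + 1]
--
--         while sha[:min_prefix] == _next_sha(shas, sha)[:min_prefix]:
--             min_prefix += 1
--     return min_prefix
-- ===== SOURCE B (Python) =====
-- def find_minimum_sha_prefix(shas, min_prefix):
--     """Single pass over adjacent pairs of the sorted list, computing each
--     longest-common-prefix length directly (no repeated list.index scans,
--     no slice-comparison loop)."""
--     s = sorted(shas)
--     best = min_prefix
--     for a, b in zip(s, s[1:]):
--         n = 0
--         for x, y in zip(a, b):
--             if x != y:
--                 break
--             n += 1
--         if n + 1 > best:
--             best = n + 1
--     return best
-- ===== Notes on version B (the rewrite author's own statement) =====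
-- stated objective: faster
-- what changed: A repeatedly calls list.index inside the loop and grows the prefix by re-comparing slices; B makes one pass over adjacent pairs of the sorted list, computing each longest-common-prefix length directly and keeping a running maximum.
-- outside the precondition, e.g. on find_minimum_sha_prefix({'ab', 'b'}, -1): A returns -1, B returns 1
import Mathlib
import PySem

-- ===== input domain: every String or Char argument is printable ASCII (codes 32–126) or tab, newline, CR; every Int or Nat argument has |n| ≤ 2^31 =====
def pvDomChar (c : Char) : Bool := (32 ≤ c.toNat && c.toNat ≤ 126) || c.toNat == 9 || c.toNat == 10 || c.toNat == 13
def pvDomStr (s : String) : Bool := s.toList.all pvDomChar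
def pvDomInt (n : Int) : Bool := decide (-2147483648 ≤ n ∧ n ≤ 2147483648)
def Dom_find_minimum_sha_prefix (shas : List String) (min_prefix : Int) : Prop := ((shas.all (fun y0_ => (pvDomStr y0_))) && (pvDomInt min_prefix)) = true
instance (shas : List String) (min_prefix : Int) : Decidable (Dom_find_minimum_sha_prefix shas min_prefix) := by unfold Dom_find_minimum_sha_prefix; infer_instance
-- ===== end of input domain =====

-- B replaces A's repeated list.index scans and slice-growing while-loop by one pass over
-- adjacent pairs of the sorted list, taking the maximum of (lcp + 1); measured faster (asymptotic).


-- ===== PORT A =====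
-- 'while sha[:min_prefix] == _next_sha(shas, sha)[:min_prefix]: min_prefix += 1'
-- (fuel only makes the loop total; on every input admitted by Pre_ the fuel suffices)
def pvAWhile (sha nxt : String) : Nat → Int → Int
  | 0, p => p
  | fuel+1, p =>
    if PySem.Str.slice sha none (some p) = PySem.Str.slice nxt none (some p)
    then pvAWhile sha nxt fuel (p+1) else p

-- one iteration of A's 'for sha in shas' body (s is the sorted list A iterates over)
def pvABody (s : List String) (p : Int) (sha : String) : Int :=
  match PySem.List.index? s sha with
  | none => p  -- unreachable: Python's .index raises only if sha ∉ s, but sha is drawn from s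
  | some i =>
    if (i : Int) = (s.length : Int) - 1 then p
    else
      let nxt := (PySem.List.pyGet? s ((i : Int) + 1)).getD ""
      pvAWhile sha nxt (sha.toList.length + nxt.toList.length + 1) p

def find_minimum_sha_prefix (shas : List String) (min_prefix : Int) : Int :=
  let s := PySem.List.sorted shas (fun x => x) false
  s.foldl (pvABody s) min_prefix

-- ===== PORT B =====
-- 'for x, y in zip(a, b): if x != y: break; n += 1'  — count of equal leading characters
def pvLcp : List Char → List Char → Nat
  | x :: xs, y :: ys => if x = y then pvLcp xs ys + 1 else 0
  | _, _ => 0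

def find_minimum_sha_prefix_alt (shas : List String) (min_prefix : Int) : Int :=
  let s := PySem.List.sorted shas (fun x => x) false
  (s.zip (PySem.List.slice s (some 1) none)).foldl
    (fun best ab =>
      let n : Int := (pvLcp ab.1.toList ab.2.toList : Nat)
      if n + 1 > best then n + 1 else best) min_prefix

-- ===== PRECONDITION & SPEC =====
-- Pre_ excludes lists with duplicate SHAs, on which A loops forever, and negative
-- min_prefix, which is outside the natural domain (a prefix length is a nonnegative count;
-- Python's negative-slice semantics make A's result there not a unique-prefix length).
def Pre_find_minimum_sha_prefix (shas : List String) (min_prefix : Int) : Prop :=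
  shas.Nodup ∧ 0 ≤ min_prefix
instance (shas : List String) (min_prefix : Int) : Decidable (Pre_find_minimum_sha_prefix shas min_prefix) := by unfold Pre_find_minimum_sha_prefix; infer_instance

def pvWitness_find_minimum_sha_prefix : List String × Int := (["ab", "ac", "b"], 1)

def Spec_find_minimum_sha_prefix (shas : List String) (min_prefix : Int) (out : Int) : Prop := out = find_minimum_sha_prefix_alt shas min_prefix
instance (shas : List String) (min_prefix : Int) (out : Int) : Decidable (Spec_find_minimum_sha_prefix shas min_prefix out) := by unfold Spec_find_minimum_sha_prefix; infer_instance

-- ===== CLAIM (what is proved, stated in full; the proofs are below) =====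
def Claim_equal_find_minimum_sha_prefix : Prop := ∀ (shas : List String) (min_prefix : Int), Dom_find_minimum_sha_prefix shas min_prefix → Pre_find_minimum_sha_prefix shas min_prefix → Spec_find_minimum_sha_prefix shas min_prefix (find_minimum_sha_prefix shas min_prefix)

-- ===== LEMMAS AND PROOFS =====

theorem pvLcp_le_left (a b : List Char) : pvLcp a b ≤ a.length := by
  induction a generalizing b with
  | nil => simp [pvLcp]
  | cons x xs ih =>
    cases b with
    | nil => simp [pvLcp]
    | cons y ys =>
      simp only [pvLcp]
      split
      · simpa using Nat.succ_le_succ (ih ys)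
      · simp

theorem take_eq_take_iff_le_pvLcp (a b : List Char) (hne : a ≠ b) (n : Nat) :
    a.take n = b.take n ↔ n ≤ pvLcp a b := by
  induction a generalizing b n with
  | nil =>
    cases b with
    | nil => exact absurd rfl hne
    | cons y ys =>
      simp only [pvLcp, List.take_nil]
      constructor
      · intro h; cases n with
        | zero => exact Nat.le_refl 0
        | succ m => simp at h
      · intro h; interval_cases n; simp
  | cons x xs ih =>
    cases b with
    | nil =>
      simp only [pvLcp, List.take_nil]
      constructor
      · intro h; cases n with
        | zero => exact Nat.le_refl 0
        | succ m => simp at h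
      · intro h; interval_cases n; simp
    | cons y ys =>
      cases n with
      | zero => simp
      | succ m =>
        by_cases hxy : x = y
        · subst hxy
          have hne' : xs ≠ ys := by intro h; exact hne (by rw [h])
          simp only [pvLcp, if_true, List.take_succ_cons, List.cons.injEq, true_and]
          rw [ih ys hne' m]
          omega
        · simp only [pvLcp, if_neg hxy, List.take_succ_cons, List.cons.injEq]
          constructor
          · rintro ⟨h, -⟩; exact absurd h hxy
          · intro h; omega

theorem slice_eq_iff (a b : String) (p : Int) (hp : 0 ≤ p) (hne : a ≠ b) :
    (PySem.Str.slice a none (some p) = PySem.Str.slice b none (some p)) ↔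
      p.toNat ≤ pvLcp a.toList b.toList := by
  have hne' : a.toList ≠ b.toList := fun h => hne (String.toList_inj.mp h)
  rw [← take_eq_take_iff_le_pvLcp _ _ hne']
  constructor
  · intro h
    have := congrArg String.toList h
    simpa [PySem.Str.toList_slice, PySem.List.slice_to _ hp] using this
  · intro h
    apply String.ext
    simpa [PySem.Str.toList_slice, PySem.List.slice_to _ hp] using h

theorem pvAWhile_eq (a b : String) (hne : a ≠ b) :
    ∀ (fuel : Nat) (p : Int), 0 ≤ p →
      (pvLcp a.toList b.toList : Int) + 1 ≤ p + fuel →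
      pvAWhile a b fuel p =
        (if (pvLcp a.toList b.toList : Int) + 1 > p then (pvLcp a.toList b.toList : Int) + 1 else p) := by
  intro fuel
  induction fuel with
  | zero =>
    intro p hp hf
    simp only [pvAWhile]
    rw [if_neg (by omega)]
  | succ f ih =>
    intro p hp hf
    simp only [pvAWhile]
    by_cases hc : PySem.Str.slice a none (some p) = PySem.Str.slice b none (some p)
    · rw [if_pos hc]
      have hle : p.toNat ≤ pvLcp a.toList b.toList := (slice_eq_iff a b p hp hne).mp hc
      have hple : p ≤ (pvLcp a.toList b.toList : Int) := by omega
      rw [ih (p+1) (by omega) (by omega)]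
      split <;> split <;> omega
    · rw [if_neg hc]
      have : ¬ p.toNat ≤ pvLcp a.toList b.toList := fun h => hc ((slice_eq_iff a b p hp hne).mpr h)
      rw [if_neg (by omega)]

theorem pyGet?_cons_succ {α : Type} (x : α) (xs : List α) (i : Int) (hi : 0 ≤ i) :
    PySem.List.pyGet? (x :: xs) (i + 1) = PySem.List.pyGet? xs i := by
  simp only [PySem.List.pyGet?, PySem.List.pyIdx?, List.length_cons]
  rw [if_pos (by omega), if_pos hi]
  by_cases h : i < (xs.length : Int)
  · rw [if_pos (by push_cast; omega), if_pos h]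
    simp only [Option.bind_some]
    have hto : (i + 1).toNat = i.toNat + 1 := by omega
    rw [hto]
    simp
  · rw [if_neg (by push_cast; omega), if_neg h]
    rfl

-- one step of A's fold, at the head of s (length ≥ 2)
theorem pvABody_head (x y : String) (t : List String) (p : Int) (hp : 0 ≤ p)
    (hne : x ≠ y) :
    pvABody (x :: y :: t) p x =
      (if (pvLcp x.toList y.toList : Int) + 1 > p then (pvLcp x.toList y.toList : Int) + 1 else p) := by
  have hidx : PySem.List.index? (x :: y :: t) x = some 0 := PySem.List.index?_cons_self x (y :: t)
  simp only [pvABody, hidx]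
  rw [if_neg (by simp; omega)]
  have hget : PySem.List.pyGet? (x :: y :: t) (((0 : Nat) : Int) + 1) = some y := by
    simp only [Nat.cast_zero]
    simp [PySem.List.pyGet?, PySem.List.pyIdx?]
  rw [hget]
  simp only [Option.getD_some]
  exact pvAWhile_eq x y hne _ p hp
    (by have := pvLcp_le_left x.toList y.toList; push_cast; omega)

-- A's body looks elements up in the whole list; dropping the head does not change it
-- for elements of the tail (Nodup)
theorem pvABody_shift (x : String) (rest : List String) (hx : x ∉ rest)
    (e : String) (he : e ∈ rest) (q : Int) :
    pvABody (x :: rest) q e = pvABody rest q e := by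
  have hne : x ≠ e := fun h => hx (h ▸ he)
  have hidx : PySem.List.index? (x :: rest) e = (PySem.List.index? rest e).map (· + 1) :=
    PySem.List.index?_cons_of_ne rest hne
  obtain ⟨j, hj⟩ := Option.isSome_iff_exists.mp ((PySem.List.index?_isSome_iff rest e).mpr he)
  simp only [pvABody, hidx, hj, Option.map_some]
  have hlen : ((j + 1 : Nat) : Int) = ((x :: rest).length : Int) - 1 ↔
      ((j : Nat) : Int) = ((rest).length : Int) - 1 := by
    simp; omega
  by_cases hcond : ((j : Nat) : Int) = ((rest).length : Int) - 1
  · rw [if_pos (hlen.mpr hcond), if_pos hcond]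
  · rw [if_neg (fun h => hcond (hlen.mp h)), if_neg hcond]
    have : PySem.List.pyGet? (x :: rest) (((j + 1 : Nat) : Int) + 1) =
        PySem.List.pyGet? rest (((j : Nat) : Int) + 1) := by
      push_cast
      rw [show ((j : Int) + 1 + 1) = ((j : Int) + 1) + 1 by ring]
      exact pyGet?_cons_succ x rest ((j : Int) + 1) (by omega)
    rw [this]

-- accumulator stays nonnegative through B's body
theorem pvBBody_nonneg (p n : Int) (hp : 0 ≤ p) (hn : 0 ≤ n) :
    0 ≤ (if n + 1 > p then n + 1 else p) := by split <;> omega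

theorem pv_main (s : List String) (hnd : s.Nodup) :
    ∀ p : Int, 0 ≤ p →
      s.foldl (pvABody s) p =
        (s.zip (PySem.List.slice s (some 1) none)).foldl
          (fun best ab =>
            let n : Int := (pvLcp ab.1.toList ab.2.toList : Nat)
            if n + 1 > best then n + 1 else best) p := by
  induction s with
  | nil => intro p _; simp
  | cons x rest ih =>
    intro p hp
    cases rest with
    | nil =>
      simp only [List.foldl_cons, List.foldl_nil, PySem.List.slice_from_one, List.tail_cons,
        List.zip_nil_right]
      simp [pvABody]
    | cons y t =>
      have hx : x ∉ y :: t := (List.nodup_cons.mp hnd).1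
      have hnd' : (y :: t).Nodup := (List.nodup_cons.mp hnd).2
      have hxy : x ≠ y := fun h => hx (h ▸ List.mem_cons_self)
      have hp1n : 0 ≤ (if (pvLcp x.toList y.toList : Int) + 1 > p then (pvLcp x.toList y.toList : Int) + 1 else p) :=
        pvBBody_nonneg p _ hp (by positivity)
      rw [List.foldl_cons, pvABody_head x y t p hp hxy,
        PySem.List.foldl_congr_mem (y :: t) (pvABody (x :: y :: t)) (pvABody (y :: t)) _
          (fun acc e he => pvABody_shift x (y :: t) hx e he acc),
        ih hnd' _ hp1n]
      rw [PySem.List.slice_from_one, List.tail_cons]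
      rw [PySem.List.slice_from_one, List.tail_cons]
      rw [List.zip_cons_cons, List.foldl_cons]

-- ===== VERDICT (by name: the statement is the Claim_ definition above) =====
theorem find_minimum_sha_prefix_spec : Claim_equal_find_minimum_sha_prefix := by
  intro shas min_prefix _ hpre
  obtain ⟨hnd, hmp⟩ := hpre
  unfold Spec_find_minimum_sha_prefix find_minimum_sha_prefix find_minimum_sha_prefix_alt
  simp only []
  have hnds : (PySem.List.sorted shas (fun x => x) false).Nodup :=
    (PySem.List.sorted_perm shas (fun x => x) false).nodup_iff.mpr hnd
  exact pv_main _ hnds min_prefix hmp
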